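-- pv_equiv track=rewrite | github.com/Splawik/pytigon-lib | pytigon_lib/schindent/indent_style.py | list_with_next_generator
-- ===== SOURCE A (Python) =====
-- from collections.abc import Callable, Generator
-- from typing import Any, Dict, List, Optional, TextIO, Tuple, Union
--
-- def list_with_next_generator(
--     items: List[Any],
-- ) -> Generator[Tuple[Any, Optional[Any]], None, None]:
--     """Yield each item paired with its successor (or None for the last).
--
--     Args:
--         items: Non-empty list of items.
--
--     Returns:
--         Generator yielding (current, next) tuples.
--     """
--     if not items:
--         return
--     current = items[0]
--     for item in items[1:]:
--         yield (current, item)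
--         current = item
--     yield (items[-1], None)
-- ===== SOURCE B (Python) =====
-- def list_with_next_generator(items):
--     # Stateless: zip items with its shifted companion sequence.
--     yield from zip(items, items[1:] + [None])
-- ===== Notes on version B (the rewrite author's own statement) =====
-- stated objective: idiomatic
-- what changed: Replaces the threaded `current` accumulator loop plus separate final yield with a stateless zip of the list against its shifted companion `items[1:] + [None]`.
import Mathlib
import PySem

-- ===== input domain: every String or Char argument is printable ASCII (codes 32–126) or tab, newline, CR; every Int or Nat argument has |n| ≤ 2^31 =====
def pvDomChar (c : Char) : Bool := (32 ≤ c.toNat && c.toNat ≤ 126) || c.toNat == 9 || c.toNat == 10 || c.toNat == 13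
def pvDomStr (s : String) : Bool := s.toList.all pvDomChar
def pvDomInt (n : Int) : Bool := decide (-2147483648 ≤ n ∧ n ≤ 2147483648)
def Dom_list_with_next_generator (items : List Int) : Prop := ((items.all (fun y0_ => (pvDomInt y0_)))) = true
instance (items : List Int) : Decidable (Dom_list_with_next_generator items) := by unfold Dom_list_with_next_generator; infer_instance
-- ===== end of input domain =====

-- B replaces A's threaded `current` accumulator and separate final yield with a
-- stateless zip of the list against its shifted companion `items[1:] + [None]` (idiomatic).

-- ===== PORT A =====
-- the for-loop over items[1:], threading `current`
def listWithNextLoop (current : Int) (rest : List Int) : List (Int × Option Int) :=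
  match rest with
  | [] => []
  | item :: tl => (current, some item) :: listWithNextLoop item tl

def list_with_next_generator (items : List Int) : List (Int × Option Int) :=
  match items with
  | [] => []
  | c :: rest =>
    -- current = items[0]; loop over items[1:]; final yield (items[-1], None)
    listWithNextLoop c rest ++ [((c :: rest).getLast (by simp), none)]

-- ===== PORT B =====
def list_with_next_generator_alt (items : List Int) : List (Int × Option Int) :=
  -- zip(items, items[1:] + [None])
  items.zip ((PySem.List.slice items (1 : Int) (items.length : Int)).map Option.some ++ [none])

-- ===== PRECONDITION & SPEC =====
def Spec_list_with_next_generator (items : List Int) (out : List (Int × Option Int)) : Prop := out = list_with_next_generator_alt items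
instance (items : List Int) (out : List (Int × Option Int)) : Decidable (Spec_list_with_next_generator items out) := by unfold Spec_list_with_next_generator; infer_instance

-- ===== CLAIM (what is proved, stated in full; the proofs are below) =====
def Claim_equal_list_with_next_generator : Prop := ∀ (items : List Int), Dom_list_with_next_generator items → Spec_list_with_next_generator items (list_with_next_generator items)

-- ===== LEMMAS AND PROOFS =====
lemma slice_one (items : List Int) :
    PySem.List.slice items (1 : Int) (items.length : Int) = items.drop 1 := by
  have h := PySem.List.slice_natCast (xs := items) (a := 1) (b := items.length)
  norm_num at h
  rw [h]
  cases items <;> simp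

lemma alt_eq (items : List Int) :
    list_with_next_generator_alt items
      = items.zip ((items.drop 1).map Option.some ++ [none]) := by
  simp [list_with_next_generator_alt, slice_one]

lemma main_cons (rest : List Int) : ∀ c : Int,
    listWithNextLoop c rest ++ [((c :: rest).getLast (by simp), none)]
      = (c :: rest).zip ((rest).map Option.some ++ [none]) := by
  induction rest with
  | nil => intro c; simp [listWithNextLoop]
  | cons x xs ih =>
    intro c
    have h := ih x
    simp only [listWithNextLoop, List.cons_append, List.map_cons, List.zip_cons_cons]
    rw [List.getLast_cons (by simp)]
    exact congrArg _ h

-- ===== VERDICT (by name: the statement is the Claim_ definition above) =====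
theorem list_with_next_generator_spec : Claim_equal_list_with_next_generator := by
  intro items _
  unfold Spec_list_with_next_generator
  rw [alt_eq]
  cases items with
  | nil => simp [list_with_next_generator]
  | cons c rest =>
    simp only [list_with_next_generator, List.drop_succ_cons, List.drop_zero]
    exact main_cons rest c
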